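-- pv_equiv track=rewrite | github.com/EdwinAtieno/Leetcode_challenges | Pete, the baker/domino.py | minmum_domino
-- ===== SOURCE A (Python) =====
-- from typing import List
--
-- def minmum_domino(A: List) -> int:
--     count = 0
--     for i in range(len(A)):
--         for j in range(i + 1, len(A)):
--             if (
--                 A[i][0] == A[j][0]
--                 or A[i][0] == A[j][1]
--                 or A[i][1] == A[j][0]
--                 or A[i][1] == A[j][1]
--             ):
--                 count += 1
--     return count
-- ===== SOURCE B (Python) =====
-- def minmum_domino(A):
--     # One pass: for each domino, count earlier dominoes sharing a value via
--     # hash counts of single values and of unordered value pairs (inclusion-exclusion).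
--     if len(A) < 2:
--         return 0
--     val = {}
--     both = {}
--     count = 0
--     for t in A:
--         a, b = t[0], t[1]
--         if a == b:
--             count += val.get(a, 0)
--             val[a] = val.get(a, 0) + 1
--         else:
--             lo, hi = (a, b) if a < b else (b, a)
--             count += val.get(a, 0) + val.get(b, 0) - both.get((lo, hi), 0)
--             val[a] = val.get(a, 0) + 1
--             val[b] = val.get(b, 0) + 1
--             both[(lo, hi)] = both.get((lo, hi), 0) + 1
--     return count
-- ===== Notes on version B (the rewrite author's own statement) =====
-- stated objective: faster
-- what changed: Replaced the all-pairs double loop by a single pass that keeps hash counts of each pip value and of each unordered value pair, adding per domino the number of earlier sharing dominoes by inclusion-exclusion.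
-- outside the precondition, e.g. on minmum_domino([[1], [1]]): A returns 1, B raises IndexError
import Mathlib
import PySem

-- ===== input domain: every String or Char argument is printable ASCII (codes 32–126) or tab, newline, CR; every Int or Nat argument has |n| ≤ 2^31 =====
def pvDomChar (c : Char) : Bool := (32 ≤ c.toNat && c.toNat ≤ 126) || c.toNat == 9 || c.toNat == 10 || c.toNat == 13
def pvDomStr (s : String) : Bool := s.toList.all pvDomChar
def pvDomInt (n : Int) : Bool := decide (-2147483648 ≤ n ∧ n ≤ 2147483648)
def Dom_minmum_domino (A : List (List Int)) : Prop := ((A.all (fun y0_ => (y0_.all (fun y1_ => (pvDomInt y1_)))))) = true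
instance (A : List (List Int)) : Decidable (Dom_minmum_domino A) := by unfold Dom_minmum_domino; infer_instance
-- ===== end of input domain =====

-- B replaces A's all-pairs double loop by one pass with hash counts of values and of
-- unordered value pairs (inclusion-exclusion); asymptotically faster (O(n) vs O(n^2)).

-- ===== PORT A =====
def minmum_domino (A : List (List Int)) : Int :=
  (PySem.List.pyRange 0 (A.length : Int) 1).foldl (fun count i =>
    (PySem.List.pyRange (i + 1) (A.length : Int) 1).foldl (fun count j =>
      let ai := PySem.List.pyGetD A i []
      let aj := PySem.List.pyGetD A j []
      if PySem.List.pyGetD ai 0 0 == PySem.List.pyGetD aj 0 0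
          || PySem.List.pyGetD ai 0 0 == PySem.List.pyGetD aj 1 0
          || PySem.List.pyGetD ai 1 0 == PySem.List.pyGetD aj 0 0
          || PySem.List.pyGetD ai 1 0 == PySem.List.pyGetD aj 1 0 then
        count + 1
      else count) count) 0

-- ===== PORT B =====
-- loop body of Source B's single pass (state: value counts, pair counts, running count)
def bStep (s : PySem.Dict Int Int × PySem.Dict (Int × Int) Int × Int) (t : List Int) :
    PySem.Dict Int Int × PySem.Dict (Int × Int) Int × Int :=
  let val := s.1
  let both := s.2.1
  let count := s.2.2
  let a := PySem.List.pyGetD t 0 0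
  let b := PySem.List.pyGetD t 1 0
  if a = b then
    (val.insert a (val.getD a 0 + 1), both, count + val.getD a 0)
  else
    let lo := if a < b then a else b
    let hi := if a < b then b else a
    let count' := count + (val.getD a 0 + val.getD b 0 - both.getD (lo, hi) 0)
    let val' := val.insert a (val.getD a 0 + 1)
    let val'' := val'.insert b (val'.getD b 0 + 1)
    (val'', both.insert (lo, hi) (both.getD (lo, hi) 0 + 1), count')

def minmum_domino_alt (A : List (List Int)) : Int :=
  if A.length < 2 then 0
  else (A.foldl bStep (PySem.Dict.empty, PySem.Dict.empty, 0)).2.2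

-- ===== PRECONDITION & SPEC =====
-- Pre_ excludes lists of ≥ 2 sublists where some sublist is shorter than 2: there the Python A
-- in general raises IndexError (it can still return on some of them only thanks to
-- or-short-circuiting, e.g. [[1],[1]] → 1), and B's unconditional t[0], t[1] always raises.
def Pre_minmum_domino (A : List (List Int)) : Prop :=
  A.length < 2 ∨ ∀ x ∈ A, 2 ≤ x.length
instance (A : List (List Int)) : Decidable (Pre_minmum_domino A) := by
  unfold Pre_minmum_domino; infer_instance

def pvWitness_minmum_domino : List (List Int) := [[1, 2], [2, 3]]

def Spec_minmum_domino (A : List (List Int)) (out : Int) : Prop := out = minmum_domino_alt A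
instance (A : List (List Int)) (out : Int) : Decidable (Spec_minmum_domino A out) := by
  unfold Spec_minmum_domino; infer_instance

-- ===== CLAIM (what is proved, stated in full; the proofs are below) =====
def Claim_equal_minmum_domino : Prop :=
  ∀ (A : List (List Int)), Dom_minmum_domino A → Pre_minmum_domino A →
    Spec_minmum_domino A (minmum_domino A)

-- ===== LEMMAS AND PROOFS =====

-- proof-side helpers: the two pip values of a domino, the sharing test, the pair count
def gEl (t : List Int) (k : Int) : Int := PySem.List.pyGetD t k 0

def share (x y : List Int) : Bool :=
  gEl x 0 == gEl y 0 || gEl x 0 == gEl y 1 || gEl x 1 == gEl y 0 || gEl x 1 == gEl y 1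

-- reference value: number of index pairs i < j whose dominoes share a pip value
def numPairs : List (List Int) → Int
  | [] => 0
  | x :: rest => (rest.countP (share x) : Int) + numPairs rest

theorem share_comm (x y : List Int) : share x y = share y x := by
  rw [Bool.eq_iff_iff]; simp only [share, Bool.or_eq_true, beq_iff_eq]; tauto

theorem numPairs_snoc (L : List (List Int)) (t : List Int) :
    numPairs (L ++ [t]) = numPairs L + (L.countP (share t) : Int) := by
  induction L with
  | nil => simp [numPairs]
  | cons x L ih =>
    simp only [List.cons_append, numPairs, ih, List.countP_append, List.countP_cons,
      List.countP_nil]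
    have : share x t = share t x := share_comm x t
    push_cast
    rcases h : share t x <;> simp [this, h] <;> ring

-- value-count invariant predicate
def cV (H : List (List Int)) (v : Int) : Int :=
  (H.countP (fun t => gEl t 0 == v || gEl t 1 == v) : Int)

-- both-values-count invariant predicate (symmetric in a b)
def cB (H : List (List Int)) (a b : Int) : Int :=
  (H.countP (fun t => (gEl t 0 == a && gEl t 1 == b) || (gEl t 0 == b && gEl t 1 == a)) : Int)

theorem cB_comm (H : List (List Int)) (a b : Int) : cB H a b = cB H b a := by
  unfold cB; congr 1; apply List.countP_congr; intro t _
  rw [Bool.eq_iff_iff]; simp only [Bool.or_eq_true, Bool.and_eq_true, beq_iff_eq]; tauto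

-- inclusion–exclusion, per earlier domino, for a new domino with distinct values a ≠ b
theorem incl_excl (a b : Int) (hab : a ≠ b) (t : List Int)
    (ha : gEl t 0 = a) (hb : gEl t 1 = b) (H : List (List Int)) :
    cV H a + cV H b - cB H a b = (H.countP (share t) : Int) := by
  induction H with
  | nil => simp [cV, cB]
  | cons u H ih =>
    simp only [cV, cB, List.countP_cons] at *
    push_cast
    have hsh : share t u = (gEl u 0 == a || gEl u 1 == a || (gEl u 0 == b || gEl u 1 == b)) := by
      rw [Bool.eq_iff_iff]; simp only [share, ha, hb, Bool.or_eq_true, beq_iff_eq]; tauto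
    by_cases h1 : gEl u 0 = a <;> by_cases h2 : gEl u 1 = a <;>
      by_cases h3 : gEl u 0 = b <;> by_cases h4 : gEl u 1 = b <;>
      simp_all <;> omega

-- same-values case: the value count of a IS the sharing count for a domino (a, a)
theorem same_val (a : Int) (t : List Int) (ha : gEl t 0 = a) (hb : gEl t 1 = a)
    (H : List (List Int)) : cV H a = (H.countP (share t) : Int) := by
  have h : H.countP (fun t => gEl t 0 == a || gEl t 1 == a) = H.countP (share t) := by
    apply List.countP_congr; intro u _
    simp only [share, ha, hb, Bool.or_eq_true, beq_iff_eq]; tauto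
  unfold cV; rw [h]

theorem cV_snoc (H : List (List Int)) (t : List Int) (v : Int) :
    cV (H ++ [t]) v = cV H v + (if gEl t 0 == v || gEl t 1 == v then 1 else 0) := by
  unfold cV; rw [List.countP_append]; push_cast; simp [List.countP_cons]

theorem cB_snoc (H : List (List Int)) (t : List Int) (a b : Int) :
    cB (H ++ [t]) a b = cB H a b +
      (if (gEl t 0 == a && gEl t 1 == b) || (gEl t 0 == b && gEl t 1 == a) then 1 else 0) := by
  unfold cB; rw [List.countP_append]; push_cast; simp [List.countP_cons]

-- the one-pass loop computes the running pair count, given the dictionary invariants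
theorem loopB (L : List (List Int)) :
    ∀ (val : PySem.Dict Int Int) (both : PySem.Dict (Int × Int) Int) (count : Int)
      (H : List (List Int)),
      (∀ v, val.getD v 0 = cV H v) →
      (∀ p q, p < q → both.getD (p, q) 0 = cB H p q) →
      (L.foldl bStep (val, both, count)).2.2 = count + numPairs (H ++ L) - numPairs H := by
  induction L with
  | nil => intro val both count H _ _; simp
  | cons t L ih =>
    intro val both count H hval hboth
    rw [List.foldl_cons]
    set a := PySem.List.pyGetD t 0 0 with ha
    set b := PySem.List.pyGetD t 1 0 with hb
    have hga : gEl t 0 = a := rfl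
    have hgb : gEl t 1 = b := rfl
    have hHt : numPairs (H ++ [t]) = numPairs H + (H.countP (share t) : Int) :=
      numPairs_snoc H t
    have hassoc : H ++ t :: L = (H ++ [t]) ++ L := by simp
    by_cases hab : a = b
    · have hga' : gEl t 1 = a := by rw [hgb, ← hab]
      have hstep : bStep (val, both, count) t =
          (val.insert a (val.getD a 0 + 1), both, count + val.getD a 0) := by
        simp [bStep, ← ha, ← hb, hab]
      rw [hstep, ih _ _ _ (H ++ [t]) ?_ ?_]
      · rw [hHt, hval a, same_val a t hga hga', hassoc]; ring
      · intro v
        rw [PySem.Dict.getD_insert, cV_snoc, hval]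
        by_cases hv : v = a
        · subst hv; simp [hga]
        · have hc : ¬(gEl t 0 == v || gEl t 1 == v) = true := by
            simp only [hga, hga', Bool.or_eq_true, beq_iff_eq]
            rintro (h | h) <;> exact hv h.symm
          simp [hv, hc, hval]
      · intro p q hpq
        rw [hboth p q hpq, cB_snoc]
        have hc : ¬((gEl t 0 == p && gEl t 1 == q) || (gEl t 0 == q && gEl t 1 == p)) = true := by
          simp only [hga, hga', Bool.or_eq_true, Bool.and_eq_true, beq_iff_eq]
          rintro (⟨h1, h2⟩ | ⟨h1, h2⟩) <;> omega
        simp [hc]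
    · set lo := if a < b then a else b with hlo
      set hi := if a < b then b else a with hhi
      have hlohi : lo < hi := by
        rcases lt_or_gt_of_ne hab with h | h <;> simp [hlo, hhi, h, lt_asymm h]
      have hstep : bStep (val, both, count) t =
          ((val.insert a (val.getD a 0 + 1)).insert b
              ((val.insert a (val.getD a 0 + 1)).getD b 0 + 1),
            both.insert (lo, hi) (both.getD (lo, hi) 0 + 1),
            count + (val.getD a 0 + val.getD b 0 - both.getD (lo, hi) 0)) := by
        simp [bStep, ← ha, ← hb, hab, ← hlo, ← hhi]
      have hcBlo : cB H lo hi = cB H a b := by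
        rcases lt_or_gt_of_ne hab with h | h
        · simp [hlo, hhi, h]
        · simp [hlo, hhi, lt_asymm h, cB_comm]
      rw [hstep, ih _ _ _ (H ++ [t]) ?_ ?_]
      · rw [hHt, hval a, hval b, hboth lo hi hlohi, hcBlo,
          incl_excl a b hab t hga hgb H, hassoc]
        ring
      · intro v
        rw [PySem.Dict.getD_insert, PySem.Dict.getD_insert, PySem.Dict.getD_insert, cV_snoc, hval]
        by_cases hvb : v = b
        · subst hvb
          have hba : ¬(b = a) := fun h => hab h.symm
          simp [hba, hgb, hval]
        · by_cases hva : v = a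
          · subst hva; simp [hvb, hga]
          · have hc : ¬(gEl t 0 == v || gEl t 1 == v) = true := by
              simp only [hga, hgb, Bool.or_eq_true, beq_iff_eq]
              rintro (h | h) <;> [exact hva h.symm; exact hvb h.symm]
            simp [hva, hvb, hc, hval]
      · intro p q hpq
        rw [PySem.Dict.getD_insert, cB_snoc, hboth p q hpq, hboth lo hi hlohi]
        by_cases hk : (p, q) = (lo, hi)
        · have hp : p = lo := congrArg Prod.fst hk
          have hq : q = hi := congrArg Prod.snd hk
          have hc : ((gEl t 0 == p && gEl t 1 == q) || (gEl t 0 == q && gEl t 1 == p)) = true := by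
            simp only [hga, hgb, Bool.or_eq_true, Bool.and_eq_true, beq_iff_eq]
            rcases lt_or_gt_of_ne hab with h | h
            · left; rw [hp, hq]; simp [hlo, hhi, h]
            · right; rw [hp, hq]; simp [hlo, hhi, lt_asymm h]
          rw [hp, hq] at hc
          rw [if_pos hk, hp, hq]
          simp [hc]
        · have hc : ¬((gEl t 0 == p && gEl t 1 == q) || (gEl t 0 == q && gEl t 1 == p)) = true := by
            simp only [hga, hgb, Bool.or_eq_true, Bool.and_eq_true, beq_iff_eq]
            rintro (⟨h1, h2⟩ | ⟨h1, h2⟩) <;> apply hk <;>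
              rcases lt_or_gt_of_ne hab with h | h <;>
              simp [hlo, hhi, h, lt_asymm h, Prod.ext_iff] <;> omega
          simp [hk, hc]

theorem B_eq_numPairs (A : List (List Int)) : minmum_domino_alt A = numPairs A := by
  unfold minmum_domino_alt
  by_cases h : A.length < 2
  · rw [if_pos h]
    match A, h with
    | [], _ => simp [numPairs]
    | [x], _ => simp [numPairs]
  · rw [if_neg h, loopB A _ _ 0 [] (fun v => by simp [cV]) (fun p q _ => by simp [cB])]
    simp [numPairs]

theorem sum_drop_eq_numPairs (A : List (List Int)) :
    (((List.range A.length).map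
        (fun k => (List.countP (share (A.getD k [])) (A.drop (k + 1)) : Int))).sum) =
      numPairs A := by
  induction A with
  | nil => simp [numPairs]
  | cons x A ih =>
    rw [List.length_cons, List.range_succ_eq_map, numPairs, ← ih]
    simp only [List.map_cons, List.map_map, List.sum_cons]
    have hmap : List.map ((fun k => (List.countP (share ((x :: A).getD k []))
          ((x :: A).drop (k + 1)) : Int)) ∘ Nat.succ) (List.range A.length) =
        List.map (fun k => (List.countP (share (A.getD k [])) (A.drop (k + 1)) : Int))
          (List.range A.length) := by
      apply List.map_congr_left
      intro k _
      simp [Function.comp]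
    rw [hmap]
    simp

theorem A_eq_numPairs (A : List (List Int)) : minmum_domino A = numPairs A := by
  unfold minmum_domino
  rw [PySem.List.foldl_congr_mem _ _
    (fun count i => count + (List.countP (share (PySem.List.pyGetD A i []))
      (A.drop (i + 1).toNat) : Int)) 0 ?_]
  · rw [PySem.List.foldl_add, PySem.List.pyRange_zero_nat, List.map_map]
    rw [zero_add, ← sum_drop_eq_numPairs A]
    congr 1
    apply List.map_congr_left
    intro k _
    simp only [Function.comp, PySem.List.pyGetD_natCast, ← Nat.cast_add_one, Int.toNat_natCast]
  · intro count i hi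
    have h0i : 0 ≤ i := (PySem.List.mem_pyRange_one.mp hi).1
    rw [PySem.List.foldl_pyRange_pyGetD' A [] (fun c y =>
        if PySem.List.pyGetD (PySem.List.pyGetD A i []) 0 0 == PySem.List.pyGetD y 0 0
            || PySem.List.pyGetD (PySem.List.pyGetD A i []) 0 0 == PySem.List.pyGetD y 1 0
            || PySem.List.pyGetD (PySem.List.pyGetD A i []) 1 0 == PySem.List.pyGetD y 0 0
            || PySem.List.pyGetD (PySem.List.pyGetD A i []) 1 0 == PySem.List.pyGetD y 1 0 then
          c + 1 else c) count (by omega)]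
    rw [PySem.List.foldl_if_add_one]
    rfl

-- ===== VERDICT (by name: the statement is the Claim_ definition above) =====
theorem minmum_domino_spec : Claim_equal_minmum_domino := by
  intro A _ _
  unfold Spec_minmum_domino
  rw [A_eq_numPairs, B_eq_numPairs]
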